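-- pv_equiv track=rewrite | github.com/NathanielFHall/Odds-Data | Getting_data/lineMovementHistory.py | teams
-- ===== SOURCE A (Python) =====
-- def teams(string):
--     j = 0;
--     TeamA = ""
--     TeamB = ""
--     teamString = ""
--     for i in string:
--         if i == "/":
--             j+=1
--         if j == 7:
--                 teamString +=i
--     for k in range(len(teamString)):
--         n = 0
--         if teamString[k] == "-":
--             n+=1
--             TeamA = teamString[1:k-3]
--         if teamString[k] == "-" and n==1:
--              TeamB = teamString[k+1:]
--     return [TeamA,TeamB]
-- ===== SOURCE B (Python) =====
-- def teams(string):
--     parts = string.split("/")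
--     if len(parts) < 8:
--         return ["", ""]
--     teamString = "/" + parts[7]
--     k = teamString.rfind("-")
--     if k == -1:
--         return ["", ""]
--     return [teamString[1:k-3], teamString[k+1:]]
-- ===== Notes on version B (the rewrite author's own statement) =====
-- stated objective: simpler
-- what changed: A's two character-by-character loops (slash-counting accumulator, then a full index scan re-assigning on every '-') are replaced by split('/') to pick the 8th field directly and a single rfind('-') with two slices.
import Mathlib
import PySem

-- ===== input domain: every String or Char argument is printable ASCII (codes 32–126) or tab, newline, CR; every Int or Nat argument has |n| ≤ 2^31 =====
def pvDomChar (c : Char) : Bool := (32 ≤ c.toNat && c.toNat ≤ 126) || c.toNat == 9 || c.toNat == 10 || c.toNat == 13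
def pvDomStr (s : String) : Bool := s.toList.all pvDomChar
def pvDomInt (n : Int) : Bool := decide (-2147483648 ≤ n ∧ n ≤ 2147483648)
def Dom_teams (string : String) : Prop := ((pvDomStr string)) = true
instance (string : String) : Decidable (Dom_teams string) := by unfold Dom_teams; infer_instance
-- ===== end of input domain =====

-- B replaces A's two character-by-character accumulator loops by split('/') + rfind('-') with two slices (simpler decomposition).

-- ===== PORT A =====
-- first loop body: j counts '/', teamString collects chars while j == 7
def teamsLoop1 (st : Int × List Char) (i : Char) : Int × List Char :=
  let j := if i = '/' then st.1 + 1 else st.1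
  let teamString := if j = 7 then st.2 ++ [i] else st.2
  (j, teamString)

-- second loop body: n is reset to 0 each iteration, then the two ifs on teamString[k] == '-'
def teamsLoop2 (ts : List Char) (ab : List Char × List Char) (k : Int) : List Char × List Char :=
  let n : Int := 0
  let p := if PySem.List.pyGetD ts k ' ' = '-'
             then (n + 1, PySem.List.slice ts (some 1) (some (k - 3)))
             else (n, ab.1)
  let tb := if PySem.List.pyGetD ts k ' ' = '-' ∧ p.1 = 1
             then PySem.List.slice ts (some (k + 1)) none
             else ab.2
  (p.2, tb)

def teams (string : String) : List String :=
  let r1 := string.toList.foldl teamsLoop1 (0, [])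
  let teamString := r1.2
  let r2 := (PySem.List.pyRange 0 (teamString.length : Int) 1).foldl (teamsLoop2 teamString) ([], [])
  [String.ofList r2.1, String.ofList r2.2]

-- ===== PORT B =====
-- "/" + parts[7] is the cons of '/' onto the 8th field (guarded: len(parts) ≥ 8)
def teams_alt (string : String) : List String :=
  let parts := PySem.Chars.splitOn string.toList ['/']
  if parts.length < 8 then ["", ""]
  else
    let teamString := '/' :: PySem.List.pyGetD parts 7 []
    let k := PySem.Chars.rfind teamString ['-']
    if k = -1 then ["", ""]
    else [String.ofList (PySem.List.slice teamString (some 1) (some (k - 3))),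
          String.ofList (PySem.List.slice teamString (some (k + 1)) none)]

-- ===== PRECONDITION & SPEC =====
def Spec_teams (string : String) (out : List String) : Prop := out = teams_alt string
instance (string : String) (out : List String) : Decidable (Spec_teams string out) := by unfold Spec_teams; infer_instance

-- ===== CLAIM (what is proved, stated in full; the proofs are below) =====
def Claim_equal_teams : Prop := ∀ (string : String), Dom_teams string → Spec_teams string (teams string)

-- ===== LEMMAS AND PROOFS =====

-- what A's first loop collects, starting from slash-count j
def collect : List Char → Int → List Char
  | [], _ => []
  | c :: rest, j =>
      let j' := if c = '/' then j + 1 else j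
      (if j' = 7 then [c] else []) ++ collect rest j'

-- clean split-on-'/' recursion
def sp : List Char → List (List Char)
  | [] => [[]]
  | c :: rest => if c = '/' then [] :: sp rest else List.modifyHead (c :: ·) (sp rest)

-- greatest index < n holding '-', as A's second loop finds it
def lastDashLt (ts : List Char) : Nat → Option Nat
  | 0 => none
  | n + 1 => if ts[n]? = some '-' then some n else lastDashLt ts n

theorem sp_ne_nil (cs : List Char) : sp cs ≠ [] := by
  cases cs with
  | nil => simp [sp]
  | cons c rest =>
    simp only [sp]
    split_ifs
    · simp
    · cases h : sp rest with
      | nil => exact absurd h (sp_ne_nil rest)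
      | cons a t => simp [List.modifyHead]

theorem foldl1_eq (cs : List Char) (j : Int) (acc : List Char) :
    (cs.foldl teamsLoop1 (j, acc)).2 = acc ++ collect cs j := by
  induction cs generalizing j acc with
  | nil => simp [collect]
  | cons c rest ih =>
    simp only [List.foldl_cons, teamsLoop1, collect]
    split_ifs with h1 h2 h3 <;> simp_all [ih]

theorem collect_ge8 (cs : List Char) (j : Int) (h : 8 ≤ j) : collect cs j = [] := by
  induction cs generalizing j with
  | nil => rfl
  | cons c rest ih =>
    simp only [collect]
    split_ifs with h1 h2 h3
    · omega
    · simpa using ih _ (by omega)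
    · omega
    · simpa using ih _ (by omega)

theorem collect_seven (cs : List Char) : collect cs 7 = cs.takeWhile (· ≠ '/') := by
  induction cs with
  | nil => rfl
  | cons c rest ih =>
    simp only [collect, List.takeWhile_cons]
    by_cases h : c = '/'
    · simp [h, collect_ge8 rest 8 (by omega)]
    · simp [h, ih]

theorem sp_head (cs : List Char) : (sp cs).getD 0 [] = cs.takeWhile (· ≠ '/') := by
  induction cs with
  | nil => rfl
  | cons c rest ih =>
    simp only [sp, List.takeWhile_cons]
    by_cases h : c = '/'
    · simp [h]
    · cases hr : sp rest with
      | nil => exact absurd hr (sp_ne_nil rest)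
      | cons a t =>
        rw [← ih, hr]
        simp [h, List.modifyHead]

theorem collect_main (cs : List Char) (r : Nat) (j : Int) (hr : 1 ≤ r) (hj : j = 7 - r) :
    collect cs j = if (sp cs).length ≤ r then [] else '/' :: (sp cs).getD r [] := by
  induction cs generalizing r j with
  | nil => simp [collect, sp, hr]
  | cons c rest ih =>
    simp only [collect, sp]
    by_cases h : c = '/'
    · simp only [h, reduceIte]
      by_cases h7 : j + 1 = 7
      · have hr1 : r = 1 := by omega
        subst hr1
        have hlen : ¬ ([] :: sp rest).length ≤ 1 := by
          cases hsp : sp rest with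
          | nil => exact absurd hsp (sp_ne_nil rest)
          | cons a t => simp
        rw [if_pos h7, if_neg hlen, h7, collect_seven, ← sp_head]
        cases hsp : sp rest with
        | nil => exact absurd hsp (sp_ne_nil rest)
        | cons a t => simp
      · have hr2 : 2 ≤ r := by omega
        rw [if_neg h7, ih (r - 1) (j + 1) (by omega) (by push_cast; omega)]
        obtain ⟨r', rfl⟩ : ∃ r', r = r' + 1 := ⟨r - 1, by omega⟩
        have hr' : r' + 1 - 1 = r' := by omega
        rw [hr']
        by_cases hl : (sp rest).length ≤ r'
        · rw [if_pos hl, if_pos (by simp; omega)]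
          rfl
        · rw [if_neg hl, if_neg (by simp; omega)]
          simp [List.getD]
    · simp only [if_neg h]
      have h7 : ¬ j = 7 := by omega
      rw [if_neg h7, List.nil_append, ih r j hr hj]
      cases hsp : sp rest with
      | nil => exact absurd hsp (sp_ne_nil rest)
      | cons a t =>
        obtain ⟨r', rfl⟩ : ∃ r', r = r' + 1 := ⟨r - 1, by omega⟩
        simp [List.modifyHead, List.getD]

theorem prefix_single (a : Char) (l : List Char) : List.isPrefixOf [a] l = true ↔ l[0]? = some a := by
  cases l with
  | nil => simp [List.isPrefixOf]
  | cons c rest =>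
    simp only [List.isPrefixOf, List.getElem?_cons_zero, Option.some.injEq, Bool.and_eq_true, beq_iff_eq]
    constructor
    · rintro ⟨h1, _⟩
      exact h1.symm
    · intro h
      exact ⟨h.symm, by simp [List.isPrefixOf]⟩

theorem splitOn_go_eq (fuel : Nat) (l cur : List Char) (acc : List (List Char)) (h : l.length ≤ fuel) :
    PySem.Chars.splitOn.go ['/'] fuel l cur acc
      = acc.reverse ++ List.modifyHead (cur.reverse ++ ·) (sp l) := by
  induction fuel generalizing l cur acc with
  | zero =>
    have : l = [] := by cases l <;> simp_all
    subst this
    simp [PySem.Chars.splitOn.go, sp, List.modifyHead]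
  | succ fuel ih =>
    cases l with
    | nil =>
      show (cur.reverse :: acc).reverse = _
      simp [sp, List.modifyHead]
    | cons c rest =>
      simp only [PySem.Chars.splitOn.go]
      by_cases h' : c = '/'
      · subst h'
        have hp : List.isPrefixOf ['/'] ('/' :: rest) = true := (prefix_single '/' _).mpr (by simp)
        rw [if_pos hp]
        have hd : List.drop (List.length ['/']) ('/' :: rest) = rest := by simp
        rw [hd, ih rest [] _ (by simp at h; omega)]
        simp only [sp, reduceIte]
        cases hsp : sp rest with
        | nil => exact absurd hsp (sp_ne_nil rest)
        | cons a t => simp [List.modifyHead]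
      · have hp : ¬ List.isPrefixOf ['/'] (c :: rest) = true := by
          intro hpre
          have hc0 := (prefix_single '/' _).mp hpre
          simp only [List.getElem?_cons_zero, Option.some.injEq] at hc0
          exact h' hc0
        rw [if_neg hp]
        simp only [List.length_cons] at h
        rw [ih rest (c :: cur) acc (by omega)]
        simp only [sp, if_neg h']
        cases hsp : sp rest with
        | nil => exact absurd hsp (sp_ne_nil rest)
        | cons a t => simp [List.modifyHead]

theorem splitOn_eq_sp (cs : List Char) : PySem.Chars.splitOn cs ['/'] = sp cs := by
  unfold PySem.Chars.splitOn
  rw [splitOn_go_eq (cs.length + 1) cs [] [] (by omega)]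
  cases h : sp cs with
  | nil => exact absurd h (sp_ne_nil cs)
  | cons a t => simp [List.modifyHead]

theorem rfind_go_eq (s : List Char) (j : Nat) :
    PySem.Chars.rfind.go s ['-'] j
      = match lastDashLt s (j + 1) with
        | none => -1
        | some k => (k : Int) := by
  induction j with
  | zero =>
    simp only [PySem.Chars.rfind.go, lastDashLt]
    by_cases h : s[0]? = some '-'
    · rw [if_pos ((prefix_single '-' s).mpr h)]; simp [h]
    · rw [if_neg (fun hp => h ((prefix_single '-' s).mp hp))]; simp [h]
  | succ j ih =>
    simp only [PySem.Chars.rfind.go]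
    have hdrop : (List.drop (j + 1) s)[0]? = s[j + 1]? := by
      simp [List.getElem?_drop]
    conv_rhs => rw [lastDashLt]
    by_cases h : s[j + 1]? = some '-'
    · rw [if_pos ((prefix_single '-' _).mpr (hdrop.trans h))]
      simp [h]
    · rw [if_neg (fun hp => h (hdrop.symm.trans ((prefix_single '-' _).mp hp)))]
      simp only [h, if_neg]
      rw [ih]
      simp [h]

theorem rfind_eq (ts : List Char) :
    PySem.Chars.rfind ts ['-']
      = match lastDashLt ts ts.length with
        | none => -1
        | some k => (k : Int) := by
  unfold PySem.Chars.rfind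
  rw [rfind_go_eq]
  have : lastDashLt ts (ts.length + 1) = lastDashLt ts ts.length := by
    simp [lastDashLt]
  rw [this]

theorem loop2_step (ts : List Char) (ab : List Char × List Char) (k : Int) :
    teamsLoop2 ts ab k
      = if PySem.List.pyGetD ts k ' ' = '-'
          then (PySem.List.slice ts (some 1) (some (k - 3)), PySem.List.slice ts (some (k + 1)) none)
          else ab := by
  simp only [teamsLoop2]
  split_ifs with h1 h2 <;> simp_all

theorem loop2_fold (ts : List Char) (n : Nat) (init : List Char × List Char) :
    (PySem.List.pyRange 0 (n : Int) 1).foldl (teamsLoop2 ts) init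
      = match lastDashLt ts n with
        | none => init
        | some k => (PySem.List.slice ts (some 1) (some ((k : Int) - 3)),
                     PySem.List.slice ts (some ((k : Int) + 1)) none) := by
  induction n with
  | zero => simp [PySem.List.pyRange, lastDashLt]
  | succ n ih =>
    have hsplit : PySem.List.pyRange 0 ((n : Int) + 1) 1
        = PySem.List.pyRange 0 (n : Int) 1 ++ [(n : Int)] :=
      PySem.List.pyRange_one_succ_right (by omega)
    have hc : (((n + 1 : Nat)) : Int) = (n : Int) + 1 := by push_cast; ring
    rw [hc, hsplit, List.foldl_append, List.foldl_cons, List.foldl_nil, ih, loop2_step]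
    have hget : PySem.List.pyGetD ts (n : Int) ' ' = ts.getD n ' ' :=
      PySem.List.pyGetD_natCast ts n ' '
    conv_rhs => rw [lastDashLt]
    by_cases h : ts[n]? = some '-'
    · have : PySem.List.pyGetD ts (n : Int) ' ' = '-' := by
        rw [hget, List.getD_eq_getElem?_getD, h]; rfl
      simp [this, h]
    · have : PySem.List.pyGetD ts (n : Int) ' ' ≠ '-' := by
        rw [hget, List.getD_eq_getElem?_getD]
        cases h' : ts[n]? with
        | none => simp
        | some c => simpa [h'] using fun hc => h (by rw [h', hc])
      simp only [if_neg this, h, if_neg]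
      cases lastDashLt ts n <;> simp

-- ===== VERDICT (by name: the statement is the Claim_ definition above) =====
theorem teams_spec : Claim_equal_teams := by
  intro string _
  unfold Spec_teams
  simp only [teams, teams_alt]
  have hts : (string.toList.foldl teamsLoop1 (0, [])).2 = collect string.toList 0 := by
    simpa using foldl1_eq string.toList 0 []
  rw [hts, splitOn_eq_sp]
  have hcol := collect_main string.toList 7 0 (by omega) (by omega)
  by_cases hlen : (sp string.toList).length ≤ 7
  · rw [if_pos (by omega : (sp string.toList).length < 8)]
    rw [hcol, if_pos hlen]
    simp [loop2_fold _ 0, lastDashLt]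
  · rw [if_neg (by omega : ¬ (sp string.toList).length < 8)]
    have hget7 : PySem.List.pyGetD (sp string.toList) 7 [] = (sp string.toList).getD 7 [] := by
      have := PySem.List.pyGetD_natCast (sp string.toList) 7 ([] : List Char)
      simpa using this
    rw [hcol, if_neg hlen, hget7]
    set ts := '/' :: (sp string.toList).getD 7 [] with hts'
    rw [loop2_fold ts ts.length, rfind_eq ts]
    cases h : lastDashLt ts ts.length with
    | none => simp
    | some k => simp [show ((k : Int) ≠ -1) by omega]
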